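-- pv_equiv track=rewrite | github.com/eitamsh7/python_class | class_work_041122/main.py | minimum_lists
-- ===== SOURCE A (Python) =====
-- def minimum_lists(some_list: list[list]) -> int:
--     if len(some_list) <= 1:
--         return min(some_list[0])
--     if min(some_list[0]) > min(some_list[1]):
--         del some_list[:1]
--         return minimum_lists(some_list)
--     else:
--         del some_list[1:2]
--         return minimum_lists(some_list)
-- ===== SOURCE B (Python) =====
-- def minimum_lists(some_list: list[list]) -> int:
--     # Single pass: track the smallest min and the index of the first sublist attaining it,
--     # then collapse some_list to that surviving sublist (same mutation A leaves behind).
--     best = min(some_list[0])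
--     best_i = 0
--     for i in range(1, len(some_list)):
--         m = min(some_list[i])
--         if m < best:
--             best, best_i = m, i
--     some_list[:] = [some_list[best_i]]
--     return best
-- ===== Notes on version B (the rewrite author's own statement) =====
-- stated objective: alternative
-- what changed: Replaces A's recursive pairwise tournament (which deletes one sublist per step) with one linear pass keeping a running minimum, then a single slice-assignment that leaves the same surviving sublist.
-- outside the precondition, e.g. on minimum_lists([[], [1]]): A raises ValueError, B raises ValueError; on minimum_lists([]): A raises IndexError, B raises IndexError
import Mathlib
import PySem

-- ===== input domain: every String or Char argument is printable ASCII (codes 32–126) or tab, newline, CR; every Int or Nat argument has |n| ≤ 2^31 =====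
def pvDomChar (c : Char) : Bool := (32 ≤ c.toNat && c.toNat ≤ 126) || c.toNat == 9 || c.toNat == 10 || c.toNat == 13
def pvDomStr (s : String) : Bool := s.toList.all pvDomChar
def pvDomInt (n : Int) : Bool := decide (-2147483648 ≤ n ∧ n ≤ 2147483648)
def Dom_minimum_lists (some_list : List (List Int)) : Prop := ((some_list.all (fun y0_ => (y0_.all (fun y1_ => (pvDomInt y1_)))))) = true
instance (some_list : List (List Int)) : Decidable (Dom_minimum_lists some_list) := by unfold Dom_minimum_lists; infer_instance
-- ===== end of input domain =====

-- B replaces A's recursive pairwise tournament by one linear pass with a running minimum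
-- (objective: alternative decomposition, same asymptotic cost; B also performs A's in-place collapse of the
-- argument to the surviving sublist, though the theorems here are about the return value).


-- ===== PORT A =====
-- min(l) → (PySem.List.min? l id).getD 0; the 0 default is only reachable outside Pre_
-- (where Python raises ValueError); some_list = [] (Python IndexError) is also outside Pre_.
def minimum_lists (some_list : List (List Int)) : Int :=
  match some_list with
  | [] => 0
  | [l] => (PySem.List.min? l (fun x => x)).getD 0
  | l0 :: l1 :: rest =>
    if (PySem.List.min? l0 (fun x => x)).getD 0 > (PySem.List.min? l1 (fun x => x)).getD 0 then
      minimum_lists (l1 :: rest)          -- del some_list[:1]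
    else
      minimum_lists (l0 :: rest)          -- del some_list[1:2]

-- ===== PORT B =====
-- Source B's single pass: start from min of the first sublist, fold over the rest keeping the
-- running minimum (best_i only affects the mutation, not the return value, so it is not kept).
def minimum_lists_alt (some_list : List (List Int)) : Int :=
  match some_list with
  | [] => 0
  | l :: rest =>
    rest.foldl
      (fun best li =>
        let m := (PySem.List.min? li (fun x => x)).getD 0
        if m < best then m else best)
      ((PySem.List.min? l (fun x => x)).getD 0)

-- ===== PRECONDITION & SPEC =====
-- Pre_ excludes exactly the inputs where Python A raises: the empty outer list (IndexError)
-- and any empty sublist (ValueError from min([])).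
def Pre_minimum_lists (some_list : List (List Int)) : Prop :=
  some_list ≠ [] ∧ ∀ l ∈ some_list, l ≠ []
instance (some_list : List (List Int)) : Decidable (Pre_minimum_lists some_list) := by
  unfold Pre_minimum_lists; infer_instance

def pvWitness_minimum_lists : List (List Int) := [[3, 1], [2], [0, 5]]

def Spec_minimum_lists (some_list : List (List Int)) (out : Int) : Prop := out = minimum_lists_alt some_list
instance (some_list : List (List Int)) (out : Int) : Decidable (Spec_minimum_lists some_list out) := by unfold Spec_minimum_lists; infer_instance

-- ===== CLAIM (what is proved, stated in full; the proofs are below) =====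
def Claim_equal_minimum_lists : Prop := ∀ (some_list : List (List Int)), Dom_minimum_lists some_list → Pre_minimum_lists some_list → Spec_minimum_lists some_list (minimum_lists some_list)

-- ===== LEMMAS AND PROOFS =====

-- The two ports agree on every input (the proof does not even need Pre_, since both ports
-- use the same getD 0 reading of min on empty sublists).
theorem minimum_lists_eq_alt (some_list : List (List Int)) :
    minimum_lists some_list = minimum_lists_alt some_list := by
  fun_induction minimum_lists some_list with
  | case1 => rfl
  | case2 l => rfl
  | case3 l0 l1 rest h ih =>
    -- f l0 > f l1 : the fold's first step from f l0 over l1 yields f l1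
    rw [ih]
    simp only [minimum_lists_alt, List.foldl_cons]
    rw [if_pos h]
  | case4 l0 l1 rest h ih =>
    -- ¬ (f l0 > f l1) : the fold's first step from f l0 over l1 keeps f l0
    rw [ih]
    simp only [minimum_lists_alt, List.foldl_cons]
    rw [if_neg (by omega)]

-- ===== VERDICT (by name: the statement is the Claim_ definition above) =====
theorem minimum_lists_spec : Claim_equal_minimum_lists := by
  intro some_list _ _
  exact minimum_lists_eq_alt some_list
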